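-- pv_equiv track=rewrite | github.com/RobertDBA/ds1 | chicago_bikeshare.py | count_user_types
-- ===== SOURCE A (Python) =====
-- def column_to_list(data, index):
--         """
--         Function to add the columns(features) of a list in another list in the same order
--         Args:
--         param1: List
--         param2: Feature index to be added in another list
--         Returns:
--         List of 1 values.
--         """
--         column_list = []
--         # Tip: You can use a for to iterate over the samples, get the feature by index and append into a list
--         for d in data:
--              column_list.append(d[index])
--         return column_list
--
-- def count_user_types(data_list):
--     """
--       Count the number of user types ["Subscriber","Customer"]
--       Args:
--           param1: List
--       Returns:
--           List of 2 values with total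
--     """
--     subscriber = 0
--     customer = 0
--     for user_type in column_to_list(data_list, -3):
--         if user_type == "Subscriber" :
--             subscriber +=1
--         elif user_type == "Customer":
--             customer +=1
--     return [subscriber, customer]
-- ===== SOURCE B (Python) =====
-- def count_user_types(data_list):
--     return [sum(1 for d in data_list if d[-3] == t)
--             for t in ("Subscriber", "Customer")]
-- ===== Notes on version B (the rewrite author's own statement) =====
-- stated objective: idiomatic
-- what changed: Replaces the column-extraction helper plus single if/elif twin-counter loop by one dedicated filtered counting pass per target type (staged passes over the data, no per-element branch chain).
-- outside the precondition, e.g. on count_user_types([['Subscriber', 'x']]): A raises IndexError, B raises IndexError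
import Mathlib
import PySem

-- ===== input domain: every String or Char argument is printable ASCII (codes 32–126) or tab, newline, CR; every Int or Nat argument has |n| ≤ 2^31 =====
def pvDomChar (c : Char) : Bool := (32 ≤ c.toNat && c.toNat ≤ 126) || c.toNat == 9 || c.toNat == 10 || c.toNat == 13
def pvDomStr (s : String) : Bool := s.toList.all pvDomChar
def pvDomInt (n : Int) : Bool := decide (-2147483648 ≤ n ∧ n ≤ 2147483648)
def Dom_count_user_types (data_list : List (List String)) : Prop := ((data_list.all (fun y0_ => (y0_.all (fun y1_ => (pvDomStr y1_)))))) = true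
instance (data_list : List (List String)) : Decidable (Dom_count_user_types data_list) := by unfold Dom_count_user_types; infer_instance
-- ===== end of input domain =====

-- B drops the helper + if/elif twin-counter loop: one filtered counting pass per target type (idiomatic; same cost).

-- ===== PORT A =====
-- column_to_list: for d in data: column_list.append(d[index]); pyGetD is exact here since Pre_ keeps index -3 in range
def column_to_list (data : List (List String)) (index : Int) : List String :=
  data.foldl (fun column_list d => column_list ++ [PySem.List.pyGetD d index ""]) []

def count_user_types (data_list : List (List String)) : List Int :=
  let p := (column_to_list data_list (-3)).foldl
    (fun (p : Int × Int) user_type =>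
      if user_type == "Subscriber" then (p.1 + 1, p.2)
      else if user_type == "Customer" then (p.1, p.2 + 1)
      else p) (0, 0)
  [p.1, p.2]

-- ===== PORT B =====
-- sum(1 for d in data_list if d[-3] == t) is ported as countP of the filter's predicate
def count_user_types_alt (data_list : List (List String)) : List Int :=
  ["Subscriber", "Customer"].map
    (fun t => (data_list.countP (fun d => PySem.List.pyGetD d (-3) "" == t) : Int))

-- ===== PRECONDITION & SPEC =====
-- Pre_ excludes inputs where some row has fewer than 3 entries: there d[-3] raises IndexError in both programs.
def Pre_count_user_types (data_list : List (List String)) : Prop :=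
  (data_list.all (fun d => 3 ≤ d.length)) = true
instance (data_list : List (List String)) : Decidable (Pre_count_user_types data_list) := by unfold Pre_count_user_types; infer_instance
def pvWitness_count_user_types : List (List String) := [["a", "Subscriber", "x", "y"], ["b", "Customer", "z"]]
def Spec_count_user_types (data_list : List (List String)) (out : List Int) : Prop := out = count_user_types_alt data_list
instance (data_list : List (List String)) (out : List Int) : Decidable (Spec_count_user_types data_list out) := by unfold Spec_count_user_types; infer_instance

-- ===== CLAIM (what is proved, stated in full; the proofs are below) =====
def Claim_equal_count_user_types : Prop := ∀ (data_list : List (List String)), Dom_count_user_types data_list → Pre_count_user_types data_list → Spec_count_user_types data_list (count_user_types data_list)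

-- ===== LEMMAS AND PROOFS =====
theorem column_to_list_eq_map (data : List (List String)) (index : Int) :
    column_to_list data index = data.map (fun d => PySem.List.pyGetD d index "") := by
  unfold column_to_list
  suffices h : ∀ (l : List (List String)) (acc : List String),
      l.foldl (fun column_list d => column_list ++ [PySem.List.pyGetD d index ""]) acc =
        acc ++ l.map (fun d => PySem.List.pyGetD d index "") by
    simpa using h data []
  intro l
  induction l with
  | nil => simp
  | cons x xs ih => intro acc; simp [ih]

theorem foldl_pair_count (l : List String) (s c : Int) :
    l.foldl (fun (p : Int × Int) user_type =>
      if user_type == "Subscriber" then (p.1 + 1, p.2)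
      else if user_type == "Customer" then (p.1, p.2 + 1)
      else p) (s, c) = (s + l.count "Subscriber", c + l.count "Customer") := by
  induction l generalizing s c with
  | nil => simp
  | cons x xs ih =>
    simp only [List.foldl_cons]
    by_cases h1 : x = "Subscriber"
    · subst h1
      rw [if_pos (by simp), ih]
      simp [Prod.ext_iff]
      ring
    · by_cases h2 : x = "Customer"
      · subst h2
        rw [if_neg (by simp), if_pos (by simp), ih]
        simp [Prod.ext_iff]
        ring
      · rw [if_neg (by simp [h1]), if_neg (by simp [h2]), ih]
        simp [h1, h2]

theorem count_col_eq_countP (data_list : List (List String)) (t : String) :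
    (data_list.map (fun d => PySem.List.pyGetD d (-3) "")).count t =
      data_list.countP (fun d => PySem.List.pyGetD d (-3) "" == t) := by
  rw [List.count_eq_countP, List.countP_map]
  rfl

-- ===== VERDICT (by name: the statement is the Claim_ definition above) =====
theorem count_user_types_spec : Claim_equal_count_user_types := by
  intro data_list _ _
  unfold Spec_count_user_types count_user_types count_user_types_alt
  simp only [column_to_list_eq_map, foldl_pair_count, List.map_cons, List.map_nil,
    count_col_eq_countP]
  simp
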